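-- pv_equiv track=rewrite | github.com/Radcliffe/OEIS-Python | src/oeispy/A339/A339607.py | aupto
-- ===== SOURCE A (Python) =====
-- def aupto(n):
--   alst, used = [1], {1}
--   for i in range(2, n+1):
--     binprev = bin(alst[-1])[2:]
--     binwt = binprev.count("1")
--     targetstr = bin(binwt)[2:]
--     morebits, extra, ai = 0, 0, binwt
--     while ai in used:
--       morebits += 1
--       found = False
--       for k in range(2**morebits):
--         binstrk = bin(k)[2:]
--         binstrk = "0"*(morebits-len(binstrk)) + binstrk # pad to length
--         for msbs in range(morebits+1):
--           trystr = binstrk[:msbs] + targetstr + binstrk[msbs:]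
--           if trystr[0] == "0": continue
--           trynum = int(trystr, 2)
--           if trynum not in used:
--             if not found: ai = trynum; found = True
--             else: ai = min(ai, trynum)
--       if found: break
--     alst.append(ai); used.add(ai)
--   return alst    # use alst[n-1] for a(n)
-- ===== SOURCE B (Python) =====
-- def aupto(n):
--   # Linear-scan re-implementation: the next term is simply the smallest unused
--   # integer whose binary representation contains bin(binwt)[2:] as a substring,
--   # so scan upward from binwt (the smallest possible such number).
--   alst, used = [1], {1}
--   for i in range(2, n + 1):
--     binprev = bin(alst[-1])[2:]
--     binwt = binprev.count("1")
--     targetstr = bin(binwt)[2:]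
--     m = binwt
--     while m in used or targetstr not in bin(m)[2:]:
--       m += 1
--     alst.append(m)
--     used.add(m)
--   return alst
-- ===== Notes on version B (the rewrite author's own statement) =====
-- stated objective: faster
-- what changed: Replaces A's per-term candidate construction (enumerating every padded bit-string of each width, inserting targetstr at every position, parsing each back to an int, and minimising over a growing while loop) by a direct upward linear scan from binwt that returns the first unused integer whose binary string contains targetstr as a substring.
import Mathlib
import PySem

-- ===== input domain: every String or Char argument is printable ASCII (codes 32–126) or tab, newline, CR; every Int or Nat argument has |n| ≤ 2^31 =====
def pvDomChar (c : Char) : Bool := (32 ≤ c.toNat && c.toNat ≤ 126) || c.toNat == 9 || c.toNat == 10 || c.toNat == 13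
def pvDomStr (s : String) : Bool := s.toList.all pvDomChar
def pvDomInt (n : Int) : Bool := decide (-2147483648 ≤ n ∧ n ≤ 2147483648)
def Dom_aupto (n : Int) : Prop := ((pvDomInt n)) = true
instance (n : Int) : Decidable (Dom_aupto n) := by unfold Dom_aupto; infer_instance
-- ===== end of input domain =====

-- B replaces A's candidate-construction search by a direct linear scan; measured faster.

-- ===== PORT A =====
-- int(trystr, 2): ported by hand as a fold over the digit characters; exact for the
-- nonempty '0'/'1' strings this program constructs (no sign/space/prefix/underscore ever occurs here).
def parseBin (cs : List Char) : Int :=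
  cs.foldl (fun a c => 2 * a + (if c = '1' then 1 else 0)) 0

-- the nested 'for k' / 'for msbs' loops of A's while body, carrying the (found, ai) state
def auptoFor (used : PySem.Set Int) (target : List Char) (mb : Nat) (ai0 : Int) : Bool × Int :=
  (List.range (2 ^ mb)).foldl (fun st (k : Nat) =>
    let binstrk := PySem.Int.toBinChars (k : Int)                         -- bin(k)[2:], k ≥ 0
    let binstrk := List.replicate (mb - binstrk.length) '0' ++ binstrk    -- "0"*(morebits-len(binstrk)) + binstrk
    (List.range (mb + 1)).foldl (fun st (msbs : Nat) =>
      let trystr := binstrk.take msbs ++ target ++ binstrk.drop msbs     -- binstrk[:msbs] + targetstr + binstrk[msbs:]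
      if trystr.head? = some '0' then st                                  -- if trystr[0] == "0": continue  (trystr is never empty)
      else
        let trynum := parseBin trystr                                     -- trynum = int(trystr, 2)
        if PySem.Set.contains used trynum then st
        else match st with
          | (false, _) => (true, trynum)
          | (true, ai) => (true, min ai trynum)) st) (false, ai0)

-- A's 'while ai in used' loop; the Nat fuel is a totality guard only (the loop always
-- finds a term within used.length + 2 rounds, proved below), it changes no computed value
def auptoWhile (used : PySem.Set Int) (target : List Char) : Nat → Nat → Int → Int
  | 0, _, ai => ai
  | fuel + 1, morebits, ai =>
    if PySem.Set.contains used ai then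
      match auptoFor used target (morebits + 1) ai with
      | (true, ai') => ai'
      | (false, ai') => auptoWhile used target fuel (morebits + 1) ai'
    else ai

-- one iteration of A's 'for i in range(2, n+1)' body
def auptoStep (alst : List Int) (used : PySem.Set Int) : List Int × PySem.Set Int :=
  let binprev := PySem.List.slice (PySem.Int.toBinChars0b ((PySem.List.pyGet? alst (-1)).getD 0)) (some 2) none  -- bin(alst[-1])[2:]; alst is never empty
  let binwt : Int := (PySem.Chars.count binprev ['1'] : Int)                 -- binprev.count("1")
  let targetstr := PySem.List.slice (PySem.Int.toBinChars0b binwt) (some 2) none  -- bin(binwt)[2:]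
  let ai := auptoWhile used targetstr (used.length + 2) 0 binwt
  (alst ++ [ai], PySem.Set.add used ai)

def aupto (n : Int) : List Int :=
  ((PySem.List.pyRange 2 (n + 1) 1).foldl (fun st _i => auptoStep st.1 st.2)
    ([1], PySem.Set.ofList [1])).1

-- ===== PORT B =====
-- B's 'while m in used or targetstr not in bin(m)[2:]' scan; the Nat fuel is a totality
-- guard only (the scan always stops within (binwt+1)*2^(used.length+1) steps, proved below)
def auptoScan (used : PySem.Set Int) (target : List Char) : Nat → Int → Int
  | 0, m => m
  | fuel + 1, m =>
    if PySem.Set.contains used m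
        || !PySem.Chars.isIn target (PySem.List.slice (PySem.Int.toBinChars0b m) (some 2) none) then
      auptoScan used target fuel (m + 1)
    else m

-- one iteration of B's loop body
def auptoStepAlt (alst : List Int) (used : PySem.Set Int) : List Int × PySem.Set Int :=
  let binprev := PySem.List.slice (PySem.Int.toBinChars0b ((PySem.List.pyGet? alst (-1)).getD 0)) (some 2) none  -- bin(alst[-1])[2:]; alst is never empty
  let binwt : Int := (PySem.Chars.count binprev ['1'] : Int)                 -- binprev.count("1")
  let targetstr := PySem.List.slice (PySem.Int.toBinChars0b binwt) (some 2) none  -- bin(binwt)[2:]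
  let m := auptoScan used targetstr ((binwt.toNat + 1) * 2 ^ (used.length + 1)) binwt
  (alst ++ [m], PySem.Set.add used m)

def aupto_alt (n : Int) : List Int :=
  ((PySem.List.pyRange 2 (n + 1) 1).foldl (fun st _i => auptoStepAlt st.1 st.2)
    ([1], PySem.Set.ofList [1])).1

-- ===== PRECONDITION & SPEC =====
def Spec_aupto (n : Int) (out : List Int) : Prop := out = aupto_alt n
instance (n : Int) (out : List Int) : Decidable (Spec_aupto n out) := by unfold Spec_aupto; infer_instance

-- ===== CLAIM (what is proved, stated in full; the proofs are below) =====
def Claim_equal_aupto : Prop := ∀ (n : Int), Dom_aupto n → Spec_aupto n (aupto n)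

-- ===== LEMMAS AND PROOFS =====


-- model of bin(n)[2:] as a structurally recursive function
def pvBits : Nat → List Char
  | n => if _h : n < 2 then [Nat.digitChar n] else pvBits (n / 2) ++ [Nat.digitChar (n % 2)]
decreasing_by exact Nat.div_lt_self (by omega) (by omega)

lemma pvBits_eq (n : Nat) : pvBits n = if n < 2 then [Nat.digitChar n] else pvBits (n / 2) ++ [Nat.digitChar (n % 2)] := by
  rw [pvBits]; by_cases h : n < 2 <;> simp [h]

lemma pvBits_ne_nil (n : Nat) : pvBits n ≠ [] := by
  rw [pvBits_eq]; split <;> simp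

def pvIsBin (cs : List Char) : Prop := ∀ c ∈ cs, c = '0' ∨ c = '1'

lemma pvBits_isBin (n : Nat) : pvIsBin (pvBits n) := by
  induction n using Nat.strong_induction_on with
  | _ n ih =>
    rw [pvBits_eq]
    split
    · intro c hc; simp at hc; subst hc
      interval_cases n <;> simp [Nat.digitChar]
    · intro c hc
      simp only [List.mem_append, List.mem_singleton] at hc
      rcases hc with hc | hc
      · exact ih (n / 2) (Nat.div_lt_self (by omega) (by omega)) c hc
      · subst hc
        rcases Nat.mod_two_eq_zero_or_one n with h | h <;> rw [h] <;> simp [Nat.digitChar]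

lemma pvBits_head (n : Nat) (hn : 1 ≤ n) : (pvBits n).head? = some '1' := by
  induction n using Nat.strong_induction_on with
  | _ n ih =>
    rw [pvBits_eq]
    split
    · interval_cases n <;> simp_all [Nat.digitChar]
    · rename_i h
      rw [List.head?_append, ih (n / 2) (Nat.div_lt_self (by omega) (by omega)) (by omega)]
      rfl

def pvVal (cs : List Char) : Nat := cs.foldl (fun a c => 2 * a + (if c = '1' then 1 else 0)) 0

lemma pvVal_shift (cs : List Char) (a : Nat) :
    cs.foldl (fun a c => 2 * a + (if c = '1' then 1 else 0)) a = a * 2 ^ cs.length + pvVal cs := by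
  induction cs generalizing a with
  | nil => simp [pvVal]
  | cons c t ih =>
    simp only [List.foldl_cons, List.length_cons, pvVal] at *
    rw [ih, ih (2 * 0 + if c = '1' then 1 else 0)]
    split_ifs <;> ring

lemma pvVal_append (xs ys : List Char) : pvVal (xs ++ ys) = pvVal xs * 2 ^ ys.length + pvVal ys := by
  unfold pvVal
  rw [List.foldl_append, pvVal_shift]
  rfl

lemma pvVal_singleton (c : Char) : pvVal [c] = if c = '1' then 1 else 0 := by
  simp [pvVal]

lemma pvVal_cons (c : Char) (t : List Char) :
    pvVal (c :: t) = (if c = '1' then 1 else 0) * 2 ^ t.length + pvVal t := by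
  have : (c :: t) = [c] ++ t := rfl
  rw [this, pvVal_append, pvVal_singleton]

lemma pvVal_replicate_zero (j : Nat) : pvVal (List.replicate j '0') = 0 := by
  induction j with
  | zero => rfl
  | succ j ih =>
    have : List.replicate (j+1) '0' = List.replicate j '0' ++ ['0'] := by
      rw [List.replicate_succ']
    rw [this, pvVal_append, ih, pvVal_singleton]
    simp

lemma pvVal_pvBits (n : Nat) : pvVal (pvBits n) = n := by
  induction n using Nat.strong_induction_on with
  | _ n ih =>
    rw [pvBits_eq]
    split
    · interval_cases n <;> simp [pvVal_singleton, Nat.digitChar]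
    · rw [pvVal_append, ih (n / 2) (Nat.div_lt_self (by omega) (by omega)), pvVal_singleton]
      rcases Nat.mod_two_eq_zero_or_one n with h | h <;> rw [h] <;> simp [Nat.digitChar] <;> omega

lemma pvVal_lt (cs : List Char) (h : pvIsBin cs) : pvVal cs < 2 ^ cs.length := by
  induction cs with
  | nil => simp [pvVal]
  | cons c t ih =>
    have h2 := ih (fun x hx => h x (List.mem_cons_of_mem _ hx))
    rw [pvVal_cons]
    simp only [List.length_cons, pow_succ]
    split <;> omega

lemma pvVal_ge (cs : List Char) (h : cs.head? = some '1') : 2 ^ (cs.length - 1) ≤ pvVal cs := by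
  cases cs with
  | nil => simp at h
  | cons c t =>
    simp only [List.head?_cons, Option.some.injEq] at h
    subst h
    rw [pvVal_cons]
    simp

lemma pvVal_pos (cs : List Char) (h : cs.head? = some '1') : 1 ≤ pvVal cs := by
  have := pvVal_ge cs h
  have : (1:Nat) ≤ 2 ^ (cs.length - 1) := Nat.one_le_two_pow
  omega

lemma pvBits_pvVal (cs : List Char) (hb : pvIsBin cs) (hh : cs.head? = some '1') :
    pvBits (pvVal cs) = cs := by
  induction cs using List.reverseRecOn with
  | nil => simp at hh
  | append_singleton ds c ih =>
    cases ds with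
    | nil =>
      simp only [List.nil_append, List.head?_cons, Option.some.injEq] at hh
      subst hh
      simp [pvVal_singleton, pvBits_eq, Nat.digitChar]
    | cons d t =>
      have hds : ((d :: t) ++ [c]).head? = some d := by simp
      rw [hds] at hh
      injection hh with hh
      subst hh
      have hbds : pvIsBin ('1' :: t) := fun x hx => hb x (by simp only [List.mem_append]; exact Or.inl hx)
      have hcb : c = '0' ∨ c = '1' := hb c (by simp)
      have hvds : 1 ≤ pvVal ('1' :: t) := pvVal_pos _ (by simp)
      have hva : pvVal (('1' :: t) ++ [c]) = 2 * pvVal ('1' :: t) + (if c = '1' then 1 else 0) := by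
        rw [pvVal_append, pvVal_singleton]; simp; ring
      rw [hva, pvBits_eq]
      have hge2 : ¬ (2 * pvVal ('1' :: t) + (if c = '1' then 1 else 0) < 2) := by
        split <;> omega
      rw [if_neg hge2]
      have hdiv : (2 * pvVal ('1' :: t) + (if c = '1' then 1 else 0)) / 2 = pvVal ('1' :: t) := by
        split <;> omega
      have hmod : (2 * pvVal ('1' :: t) + (if c = '1' then 1 else 0)) % 2 = (if c = '1' then 1 else 0) := by
        split <;> omega
      rw [hdiv, hmod, ih hbds (by simp)]
      congr 1
      rcases hcb with h | h <;> subst h <;> simp [Nat.digitChar]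

-- length facts
lemma pvBits_length_pos (n : Nat) : 1 ≤ (pvBits n).length :=
  List.length_pos_of_ne_nil (pvBits_ne_nil n)

lemma pvBits_lt_pow (n : Nat) : n < 2 ^ (pvBits n).length := by
  conv_lhs => rw [← pvVal_pvBits n]
  exact pvVal_lt _ (pvBits_isBin n)

lemma pvBits_pow_le (n : Nat) (hn : 1 ≤ n) : 2 ^ ((pvBits n).length - 1) ≤ n := by
  conv_rhs => rw [← pvVal_pvBits n]
  exact pvVal_ge _ (pvBits_head n hn)

lemma pvBits_length_mono {m n : Nat} (h : m ≤ n) : (pvBits m).length ≤ (pvBits n).length := by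
  by_contra hc
  push_neg at hc
  rcases Nat.eq_zero_or_pos m with rfl | hm
  · have := pvBits_length_pos n
    have h0 : (pvBits 0).length = 1 := by simp [pvBits_eq]
    omega
  · have h1 : 2 ^ ((pvBits m).length - 1) ≤ m := pvBits_pow_le m hm
    have h2 : n < 2 ^ (pvBits n).length := pvBits_lt_pow n
    have h3 : (2:Nat) ^ (pvBits n).length ≤ 2 ^ ((pvBits m).length - 1) := by
      apply Nat.pow_le_pow_right (by omega)
      omega
    omega

lemma pvBits_length_le {n ℓ : Nat} (h : n < 2 ^ ℓ) (hℓ : 1 ≤ ℓ) : (pvBits n).length ≤ ℓ := by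
  rcases Nat.eq_zero_or_pos n with rfl | hn
  · have h0 : (pvBits 0).length = 1 := by simp [pvBits_eq]
    omega
  · have h1 := pvBits_pow_le n hn
    by_contra hc
    push_neg at hc
    have : (2:Nat) ^ ℓ ≤ 2 ^ ((pvBits n).length - 1) := Nat.pow_le_pow_right (by omega) (by omega)
    omega

-- padding roundtrip: re-padding the binary string of the value of a binary string restores it
lemma pvPad (p : List Char) (hb : pvIsBin p) (hne : p ≠ []) :
    List.replicate (p.length - (pvBits (pvVal p)).length) '0' ++ pvBits (pvVal p) = p := by
  induction p with
  | nil => exact absurd rfl hne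
  | cons c q ih =>
    rcases hb c List.mem_cons_self with h0 | h1
    · subst h0
      rcases List.eq_nil_or_concat q with rfl | _
      · simp [pvVal_singleton, pvBits_eq, Nat.digitChar]
      · have hq : q ≠ [] := by rintro rfl; simp_all
        have hbq : pvIsBin q := fun x hx => hb x (List.mem_cons_of_mem _ hx)
        have hv : pvVal ('0' :: q) = pvVal q := by
          rw [pvVal_cons]; simp
        have := ih hbq hq
        have hlen : (pvBits (pvVal q)).length ≤ q.length := by
          conv_rhs => rw [← this]
          simp
        rw [hv]
        have : ('0' :: q).length - (pvBits (pvVal q)).length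
             = (q.length - (pvBits (pvVal q)).length) + 1 := by simp; omega
        rw [this, List.replicate_succ]
        simp_all
    · subst h1
      rw [pvBits_pvVal _ hb (by simp)]
      simp

-- Nat.toDigitsCore / toBinChars bridge
lemma pvToDigitsCore : ∀ (f n : Nat) (l : List Char), n < f →
    Nat.toDigitsCore 2 f n l = pvBits n ++ l := by
  intro f
  induction f with
  | zero => omega
  | succ f ih =>
    intro n l hn
    rw [Nat.toDigitsCore]
    by_cases h2 : n / 2 = 0
    · rw [if_pos h2, pvBits_eq, if_pos (by omega)]
      have : n % 2 = n := Nat.mod_eq_of_lt (by omega)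
      rw [this]
      rfl
    · have hb : pvBits n = pvBits (n / 2) ++ [Nat.digitChar (n % 2)] := by
        conv_lhs => rw [pvBits_eq n]
        rw [if_neg (by omega)]
      rw [if_neg h2, ih (n / 2) _ (by omega), hb]
      simp

lemma pvToBinChars (n : Nat) : PySem.Int.toBinChars (n : Int) = pvBits n := by
  unfold PySem.Int.toBinChars
  rw [if_neg (by omega)]
  have : (n : Int).toNat = n := rfl
  rw [this]
  show Nat.toDigitsCore 2 (n+1) n [] = pvBits n
  rw [pvToDigitsCore n.succ n [] (by omega), List.append_nil]

lemma pvBin2 (n : Nat) : PySem.List.slice (PySem.Int.toBinChars0b (n : Int)) (some 2) none = pvBits n := by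
  unfold PySem.Int.toBinChars0b
  rw [if_neg (by omega)]
  have h2 : PySem.List.slice ('0' :: 'b' :: Nat.toDigits 2 (n : Int).toNat) (some 2) none
      = Nat.toDigits 2 (n : Int).toNat := by simp [pysem]
  rw [h2]
  have : (n : Int).toNat = n := rfl
  rw [this]
  show Nat.toDigitsCore 2 (n+1) n [] = pvBits n
  rw [pvToDigitsCore n.succ n [] (by omega), List.append_nil]

-- count("1") is positive when a '1' occurs
lemma pvGo_le : ∀ (f : Nat) (l : List Char) (acc : Nat), acc ≤ PySem.Chars.count.go ['1'] f l acc := by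
  intro f
  induction f with
  | zero => intro l acc; rw [PySem.Chars.count.go.eq_def]
  | succ f ih =>
    intro l acc
    rw [PySem.Chars.count.go.eq_def]
    cases l with
    | nil => simp
    | cons h t =>
      simp only []
      split
      · calc acc ≤ acc + 1 := by omega
          _ ≤ _ := ih _ _
      · exact ih _ _

lemma pvGo_pos : ∀ (f : Nat) (l : List Char) (acc : Nat), '1' ∈ l → l.length ≤ f →
    acc < PySem.Chars.count.go ['1'] f l acc := by
  intro f
  induction f with
  | zero => intro l acc hm hl; simp at hl; subst hl; simp at hm
  | succ f ih =>
    intro l acc hm hl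
    rw [PySem.Chars.count.go.eq_def]
    cases l with
    | nil => simp at hm
    | cons h t =>
      simp only []
      by_cases hh : h = '1'
      · subst hh
        rw [if_pos (by simp [List.isPrefixOf])]
        have : List.drop (['1'].length) ('1' :: t) = t := by simp
        rw [this]
        calc acc < acc + 1 := by omega
          _ ≤ _ := pvGo_le _ _ _
      · rw [if_neg (by simp [List.isPrefixOf, hh]; intro he; exact absurd he.symm hh)]
        apply ih
        · rcases hm with _ | hm
          · exact absurd rfl hh
          · assumption
        · simp at hl; omega

lemma pvCount_pos (cs : List Char) (h : '1' ∈ cs) : 1 ≤ PySem.Chars.count cs ['1'] := by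
  unfold PySem.Chars.count
  rw [if_neg (by simp)]
  exact pvGo_pos cs.length cs 0 h le_rfl

-- parseBin computes pvVal
lemma pvParse_shift (cs : List Char) (a : Nat) :
    cs.foldl (fun a c => 2 * a + (if c = '1' then 1 else 0)) ((a : Nat) : Int)
      = ((cs.foldl (fun a c => 2 * a + (if c = '1' then 1 else 0)) a : Nat) : Int) := by
  induction cs generalizing a with
  | nil => rfl
  | cons c t ih =>
    simp only [List.foldl_cons]
    have h : (2 * (a:Int) + (if c = '1' then 1 else 0))
        = (((2 * a + (if c = '1' then 1 else 0) : Nat)) : Int) := by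
      split_ifs <;> push_cast <;> ring
    rw [h, ih]

lemma pvParseBin_eq (cs : List Char) : parseBin cs = (pvVal cs : Int) := by
  unfold parseBin pvVal
  have h := pvParse_shift cs 0
  simpa using h

-- the search predicate: v is unused and its binary string contains the target
def pvP (used : PySem.Set Int) (wt v : Nat) : Prop :=
  PySem.Set.contains used (v : Int) = false ∧ pvBits wt <:+: pvBits v

lemma pvExists_least {p : Nat → Prop} (h : ∃ n, p n) : ∃ m, p m ∧ (∀ j, p j → m ≤ j) := by
  obtain ⟨n, hn⟩ := h
  obtain ⟨m, hm, hmin⟩ := wellFounded_lt.has_min {k | p k} ⟨n, hn⟩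
  exact ⟨m, hm, fun j hj => not_lt.mp (hmin j hj)⟩

lemma pvP_ge {used : PySem.Set Int} {wt v : Nat} (hwt : 1 ≤ wt) (h : pvP used wt v) : wt ≤ v := by
  obtain ⟨-, hinf⟩ := h
  have hlen : (pvBits wt).length ≤ (pvBits v).length := hinf.length_le
  rcases eq_or_lt_of_le hlen with he | hl
  · have hb : pvBits wt = pvBits v := hinf.eq_of_length he
    have hv := congrArg pvVal hb
    rw [pvVal_pvBits, pvVal_pvBits] at hv
    omega
  · have h1 : wt < 2 ^ (pvBits wt).length := pvBits_lt_pow wt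
    have hv1 : 1 ≤ v := by
      by_contra h0
      have hz : v = 0 := by omega
      subst hz
      have he0 : (pvBits 0).length = 1 := by simp [pvBits_eq]
      have := pvBits_length_pos wt
      omega
    have h2 : 2 ^ ((pvBits v).length - 1) ≤ v := pvBits_pow_le v hv1
    have h3 : (2:Nat) ^ (pvBits wt).length ≤ 2 ^ ((pvBits v).length - 1) :=
      Nat.pow_le_pow_right (by omega) (by omega)
    omega

lemma pvBits_mul_pow (wt j : Nat) (hwt : 1 ≤ wt) :
    pvBits (wt * 2 ^ j) = pvBits wt ++ List.replicate j '0' := by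
  have hb : pvIsBin (pvBits wt ++ List.replicate j '0') := by
    intro c hc
    rcases List.mem_append.mp hc with h | h
    · exact pvBits_isBin wt c h
    · left; exact List.eq_of_mem_replicate h
  have hh : (pvBits wt ++ List.replicate j '0').head? = some '1' := by
    rw [List.head?_append, pvBits_head wt hwt]; rfl
  have hv : pvVal (pvBits wt ++ List.replicate j '0') = wt * 2 ^ j := by
    rw [pvVal_append, pvVal_replicate_zero, pvVal_pvBits]
    simp
  rw [← hv, pvBits_pvVal _ hb hh]

lemma pvExists_target (used : PySem.Set Int) (wt : Nat) (hwt : 1 ≤ wt) :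
    ∃ v, pvP used wt v ∧ (pvBits v).length ≤ (pvBits wt).length + used.length + 1
      ∧ v ≤ wt * 2 ^ (used.length + 1) := by
  have hj : ∃ j, 1 ≤ j ∧ j ≤ used.length + 1 ∧ PySem.Set.contains used ((wt * 2 ^ j : Nat) : Int) = false := by
    by_contra hc
    push_neg at hc
    have hall : ∀ j, 1 ≤ j → j ≤ used.length + 1 → ((wt * 2 ^ j : Nat) : Int) ∈ used := by
      intro j h1 h2
      cases h : PySem.Set.contains used ((wt * 2 ^ j : Nat) : Int) with
      | false => exact absurd h (hc j h1 h2)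
      | true => exact (PySem.Set.contains_iff used _).mp h
    set lst := (List.range (used.length + 1)).map (fun j => ((wt * 2 ^ (j + 1) : Nat) : Int)) with hlst
    have hsub : lst ⊆ used := by
      intro x hx
      rw [hlst] at hx
      obtain ⟨j, hj, rfl⟩ := List.mem_map.mp hx
      exact hall (j + 1) (by omega) (by simp at hj; omega)
    have hndl : lst.Nodup := by
      rw [hlst]
      apply List.Nodup.map
      · intro a b hab
        simp only [Int.natCast_inj] at hab
        have := Nat.eq_of_mul_eq_mul_left (show 0 < wt by omega) hab
        have h2 := Nat.pow_right_injective (le_refl 2) this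
        omega
      · exact List.nodup_range
    have hlen : lst.length = used.length + 1 := by simp [hlst]
    have : lst.length ≤ used.length := by
      calc lst.length = lst.toFinset.card := (List.toFinset_card_of_nodup hndl).symm
        _ ≤ used.toFinset.card := Finset.card_le_card (by
            intro x hx
            simp only [List.mem_toFinset] at hx ⊢
            exact hsub hx)
        _ ≤ used.length := used.toFinset_card_le
    omega
  obtain ⟨j, hj1, hj2, hjc⟩ := hj
  refine ⟨wt * 2 ^ j, ⟨hjc, ?_⟩, ?_, ?_⟩
  · rw [pvBits_mul_pow wt j hwt]
    exact ⟨[], List.replicate j '0', by simp⟩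
  · rw [pvBits_mul_pow wt j hwt]
    simp
    omega
  · have : (2:Nat) ^ j ≤ 2 ^ (used.length + 1) := Nat.pow_le_pow_right (by omega) hj2
    exact Nat.mul_le_mul_left wt this

-- B's scan returns the least element of pvP
lemma pvScan_spec (used : PySem.Set Int) (wt : Nat) :
    ∀ (fuel m mstar : Nat), m ≤ mstar → mstar < m + fuel →
    (∀ j, m ≤ j → j < mstar → ¬ pvP used wt j) → pvP used wt mstar →
    auptoScan used (pvBits wt) fuel (m : Int) = (mstar : Int) := by
  intro fuel
  induction fuel with
  | zero => intro m mstar h2 h3; omega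
  | succ fuel ih =>
    intro m mstar hle hlt hmid hP
    rw [auptoScan]
    by_cases hm : m = mstar
    · subst hm
      have hin : PySem.Chars.isIn (pvBits wt) (PySem.List.slice (PySem.Int.toBinChars0b (m:Int)) (some 2) none) = true := by
        rw [pvBin2]
        exact (PySem.Chars.isIn_iff_infix _ _).mpr hP.2
      rw [hP.1, hin]
      simp
    · have hnp : ¬ pvP used wt m := hmid m le_rfl (by omega)
      have hcond : (PySem.Set.contains used (m:Int)
          || !PySem.Chars.isIn (pvBits wt) (PySem.List.slice (PySem.Int.toBinChars0b (m:Int)) (some 2) none)) = true := by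
        rw [pvBin2]
        cases hcu : PySem.Set.contains used (m:Int) with
        | true => rw [Bool.true_or]
        | false =>
          have hni : ¬ pvBits wt <:+: pvBits m := fun hinf => hnp ⟨hcu, hinf⟩
          rw [Bool.false_or, (PySem.Chars.isIn_eq_false_iff _ _).mpr hni]
          rfl
      rw [hcond]
      simp only [if_true]
      have hc1 : (m : Int) + 1 = ((m + 1 : Nat) : Int) := by push_cast; ring
      rw [hc1]
      exact ih (m+1) mstar (by omega) (by omega) (fun j hj1 hj2 => hmid j (by omega) hj2) hP

-- A's nested candidate loops
def pvStep (o : Option Int) (st : Bool × Int) : Bool × Int :=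
  match o with
  | none => st
  | some v =>
    match st with
    | (false, _) => (true, v)
    | (true, ai) => (true, min ai v)

def pvG (used : PySem.Set Int) (target : List Char) (mb k msbs : Nat) : Option Int :=
  let binstrk := List.replicate (mb - (pvBits k).length) '0' ++ pvBits k
  let trystr := binstrk.take msbs ++ target ++ binstrk.drop msbs
  if trystr.head? = some '0' then none
  else if PySem.Set.contains used (parseBin trystr) then none
  else some (parseBin trystr)

lemma pvFoldl_flatMap {α β σ : Type} (l : List α) (g : α → List β) (f : σ → α → β → σ) (init : σ) :
    l.foldl (fun st x => (g x).foldl (fun st y => f st x y) st) init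
      = (l.flatMap (fun x => (g x).map (fun y => (x, y)))).foldl (fun st p => f st p.1 p.2) init := by
  induction l generalizing init with
  | nil => rfl
  | cons x t ih => simp [List.flatMap_cons, List.foldl_append, List.foldl_map, ih]

def pvPairs (mb : Nat) : List (Nat × Nat) :=
  (List.range (2 ^ mb)).flatMap (fun k => (List.range (mb + 1)).map (fun msbs => (k, msbs)))

lemma pvMem_pairs (mb k msbs : Nat) : (k, msbs) ∈ pvPairs mb ↔ k < 2 ^ mb ∧ msbs ≤ mb := by
  unfold pvPairs
  constructor
  · intro hmem
    obtain ⟨a, ha, hb⟩ := List.mem_flatMap.mp hmem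
    obtain ⟨b, hb2, he⟩ := List.mem_map.mp hb
    cases he
    exact ⟨List.mem_range.mp ha, by have := List.mem_range.mp hb2; omega⟩
  · rintro ⟨h1, h2⟩
    exact List.mem_flatMap.mpr ⟨k, List.mem_range.mpr h1,
      List.mem_map.mpr ⟨msbs, List.mem_range.mpr (by omega), rfl⟩⟩

lemma pvFor_eq (used : PySem.Set Int) (target : List Char) (mb : Nat) (ai0 : Int) :
    auptoFor used target mb ai0
      = (pvPairs mb).foldl (fun st p => pvStep (pvG used target mb p.1 p.2) st) (false, ai0) := by
  unfold auptoFor pvPairs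
  rw [← pvFoldl_flatMap (List.range (2 ^ mb)) (fun _ => List.range (mb + 1))
        (fun st k msbs => pvStep (pvG used target mb k msbs) st) (false, ai0)]
  apply PySem.List.foldl_congr_mem
  intro st k _
  show (List.range (mb + 1)).foldl _ st = _
  apply PySem.List.foldl_congr_mem
  intro st' msbs _
  show _ = pvStep (pvG used target mb k msbs) st'
  rw [pvG]
  simp only [pvToBinChars]
  rcases st' with ⟨b, ai⟩
  cases b <;> split_ifs <;> rfl

lemma pvFold_true {π : Type} (l : List π) (gg : π → Option Int) (ai : Int) :
    l.foldl (fun st p => pvStep (gg p) st) (true, ai) = (true, (l.filterMap gg).foldl min ai) := by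
  induction l generalizing ai with
  | nil => rfl
  | cons x t ih =>
    cases hx : gg x with
    | none =>
      have h1 : pvStep (gg x) (true, ai) = (true, ai) := by rw [hx]; rfl
      rw [List.foldl_cons, h1, ih, List.filterMap_cons_none hx]
    | some v =>
      have h1 : pvStep (gg x) (true, ai) = (true, min ai v) := by rw [hx]; rfl
      rw [List.foldl_cons, h1, ih, List.filterMap_cons_some hx, List.foldl_cons]

lemma pvFold_false {π : Type} (l : List π) (gg : π → Option Int) (a : Int) :
    l.foldl (fun st p => pvStep (gg p) st) (false, a)
      = (match l.filterMap gg with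
        | [] => ((false, a) : Bool × Int)
        | h :: t => (true, t.foldl min h)) := by
  induction l generalizing a with
  | nil => rfl
  | cons x t ih =>
    cases hx : gg x with
    | none =>
      have h1 : pvStep (gg x) (false, a) = (false, a) := by rw [hx]; rfl
      rw [List.foldl_cons, h1, ih, List.filterMap_cons_none hx]
    | some v =>
      have h1 : pvStep (gg x) (false, a) = (true, v) := by rw [hx]; rfl
      rw [List.foldl_cons, h1, pvFold_true, List.filterMap_cons_some hx]

lemma pvFoldl_min_mem (t : List Int) (h : Int) : t.foldl min h ∈ h :: t := by
  induction t generalizing h with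
  | nil => simp
  | cons x s ih =>
    rw [List.foldl_cons]
    have hmem := ih (min h x)
    rcases List.mem_cons.mp hmem with he | hm
    · rw [he]
      rcases min_choice h x with hc | hc <;> rw [hc] <;> simp
    · exact List.mem_cons.mpr (Or.inr (List.mem_cons.mpr (Or.inr hm)))

lemma pvFoldl_min_le (t : List Int) (h : Int) : ∀ x ∈ h :: t, t.foldl min h ≤ x := by
  induction t generalizing h with
  | nil => intro x hx; simp at hx; simp [hx]
  | cons y s ih =>
    intro x hx
    rw [List.foldl_cons]
    rcases List.mem_cons.mp hx with he | hx'
    · subst he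
      exact le_trans (ih (min x y) (min x y) List.mem_cons_self) (min_le_left _ _)
    · rcases List.mem_cons.mp hx' with he | hx''
      · subst he
        exact le_trans (ih (min h x) (min h x) List.mem_cons_self) (min_le_right _ _)
      · exact ih (min h y) x (List.mem_cons_of_mem _ hx'')

-- candidates found by the double loop at width mb
def pvOk (used : PySem.Set Int) (wt mb v : Nat) : Prop :=
  PySem.Set.contains used (v : Int) = false ∧ pvBits wt <:+: pvBits v
    ∧ (pvBits v).length = (pvBits wt).length + mb

-- soundness and completeness of the candidate construction
lemma pvG_sound (used : PySem.Set Int) (wt mb k msbs : Nat) (v' : Int)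
    (hwt : 1 ≤ wt) (hmb : 1 ≤ mb) (hk : k < 2 ^ mb) (hms : msbs ≤ mb)
    (h : pvG used (pvBits wt) mb k msbs = some v') :
    ∃ v : Nat, v' = (v : Int) ∧ pvOk used wt mb v := by
  unfold pvG at h
  simp only [] at h
  set binstrk := List.replicate (mb - (pvBits k).length) '0' ++ pvBits k with hbk
  set trystr := binstrk.take msbs ++ pvBits wt ++ binstrk.drop msbs with hts
  have hlenk : (pvBits k).length ≤ mb := pvBits_length_le hk hmb
  have hlenb : binstrk.length = mb := by
    rw [hbk]; simp; omega
  have hbinb : pvIsBin binstrk := by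
    intro c hc
    rcases List.mem_append.mp hc with hc | hc
    · left; exact List.eq_of_mem_replicate hc
    · exact pvBits_isBin k c hc
  have hbint : pvIsBin trystr := by
    intro c hc
    rw [hts] at hc
    rcases List.mem_append.mp hc with hc | hc
    · rcases List.mem_append.mp hc with hc | hc
      · exact hbinb c (List.take_subset _ _ hc)
      · exact pvBits_isBin wt c hc
    · exact hbinb c (List.drop_subset _ _ hc)
  have hlent : trystr.length = (pvBits wt).length + mb := by
    rw [hts]
    simp [List.length_take, List.length_drop, hlenb]
    omega
  have htne : trystr ≠ [] := by
    intro he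
    have := congrArg List.length he
    rw [hlent] at this
    simp at this
    have := pvBits_length_pos wt
    omega
  by_cases h1 : trystr.head? = some '0'
  · rw [if_pos h1] at h
    simp at h
  · rw [if_neg h1] at h
    by_cases h2 : PySem.Set.contains used (parseBin trystr) = true
    · rw [if_pos h2] at h
      simp at h
    · rw [if_neg h2] at h
      have hv' : v' = parseBin trystr := by
        injection h with h'
        exact h'.symm
      have hhead : trystr.head? = some '1' := by
        cases hcs : trystr with
        | nil => exact absurd hcs htne
        | cons c t =>
          have hc : c = '0' ∨ c = '1' := hbint c (by rw [hcs]; exact List.mem_cons_self)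
          rcases hc with rfl | rfl
          · exact absurd (by rw [hcs]; rfl : trystr.head? = some '0') h1
          · rfl
      refine ⟨pvVal trystr, ?_, ?_, ?_, ?_⟩
      · rw [hv', pvParseBin_eq]
      · have hpb : PySem.Set.contains used (parseBin trystr) = false := by
          cases hcc : PySem.Set.contains used (parseBin trystr) with
          | false => rfl
          | true => exact absurd hcc h2
        rw [← pvParseBin_eq]
        exact hpb
      · rw [pvBits_pvVal trystr hbint hhead]
        exact ⟨binstrk.take msbs, binstrk.drop msbs, hts.symm⟩
      · rw [pvBits_pvVal trystr hbint hhead, hlent]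

lemma pvG_complete (used : PySem.Set Int) (wt mb v : Nat)
    (hwt : 1 ≤ wt) (hmb : 1 ≤ mb) (h : pvOk used wt mb v) :
    ∃ k msbs, k < 2 ^ mb ∧ msbs ≤ mb ∧ pvG used (pvBits wt) mb k msbs = some (v : Int) := by
  obtain ⟨hc, hinf, hlen⟩ := h
  obtain ⟨p, q, hw⟩ := hinf
  have hLpos := pvBits_length_pos wt
  have hlw : p.length + (pvBits wt).length + q.length = (pvBits v).length := by
    have h0 := congrArg List.length hw
    simp only [List.length_append] at h0
    omega
  have hlenpq : p.length + q.length = mb := by omega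
  have hv1 : 1 ≤ v := by
    by_contra h0
    have hz : v = 0 := by omega
    subst hz
    have he0 : (pvBits 0).length = 1 := by simp [pvBits_eq]
    omega
  have hbinv := pvBits_isBin v
  have hpq_bin : pvIsBin (p ++ q) := by
    intro c hcm
    apply hbinv
    rw [← hw]
    rcases List.mem_append.mp hcm with hcm | hcm
    · exact List.mem_append.mpr (Or.inl (List.mem_append.mpr (Or.inl hcm)))
    · exact List.mem_append.mpr (Or.inr hcm)
  have hpqne : p ++ q ≠ [] := by
    intro he
    have h0 := congrArg List.length he
    simp only [List.length_append, List.length_nil] at h0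
    omega
  set k := pvVal (p ++ q) with hkdef
  have hk : k < 2 ^ mb := by
    have := pvVal_lt (p ++ q) hpq_bin
    rw [List.length_append, hlenpq] at this
    exact this
  have hpad : List.replicate (mb - (pvBits k).length) '0' ++ pvBits k = p ++ q := by
    have := pvPad (p ++ q) hpq_bin hpqne
    rw [List.length_append, hlenpq] at this
    exact this
  refine ⟨k, p.length, hk, by omega, ?_⟩
  unfold pvG
  simp only []
  rw [hpad]
  have htake : (p ++ q).take p.length = p := List.take_left
  have hdrop : (p ++ q).drop p.length = q := List.drop_left
  rw [htake, hdrop]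
  have htr : p ++ pvBits wt ++ q = pvBits v := hw
  rw [htr]
  have hhead : (pvBits v).head? = some '1' := pvBits_head v hv1
  rw [hhead]
  have hne0 : ¬ (some '1' = some '0') := by simp
  rw [if_neg hne0]
  rw [pvParseBin_eq, pvVal_pvBits]
  rw [hc]
  simp

lemma pvFor_spec (used : PySem.Set Int) (wt mb : Nat) (ai0 : Int)
    (hwt : 1 ≤ wt) (hmb : 1 ≤ mb) :
    (auptoFor used (pvBits wt) mb ai0 = (false, ai0) ∧ ∀ v : Nat, ¬ pvOk used wt mb v)
    ∨ (∃ v : Nat, auptoFor used (pvBits wt) mb ai0 = (true, (v : Int)) ∧ pvOk used wt mb v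
        ∧ ∀ w : Nat, pvOk used wt mb w → v ≤ w) := by
  rw [pvFor_eq, pvFold_false]
  cases hvs : (pvPairs mb).filterMap (fun p => pvG used (pvBits wt) mb p.1 p.2) with
  | nil =>
    left
    refine ⟨rfl, ?_⟩
    intro v hv
    obtain ⟨k, msbs, hk, hms, hg⟩ := pvG_complete used wt mb v hwt hmb hv
    have hmem : (v : Int) ∈ (pvPairs mb).filterMap (fun p => pvG used (pvBits wt) mb p.1 p.2) :=
      List.mem_filterMap.mpr ⟨(k, msbs), (pvMem_pairs mb k msbs).mpr ⟨hk, hms⟩, hg⟩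
    rw [hvs] at hmem
    simp at hmem
  | cons hd tl =>
    right
    have hrmem : tl.foldl min hd ∈ hd :: tl := pvFoldl_min_mem tl hd
    have hrmem' : tl.foldl min hd ∈ (pvPairs mb).filterMap (fun p => pvG used (pvBits wt) mb p.1 p.2) := by
      rw [hvs]; exact hrmem
    obtain ⟨⟨k, msbs⟩, hpmem, hg⟩ := List.mem_filterMap.mp hrmem'
    obtain ⟨hk, hms⟩ := (pvMem_pairs mb k msbs).mp hpmem
    obtain ⟨v, hveq, hok⟩ := pvG_sound used wt mb k msbs _ hwt hmb hk hms hg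
    refine ⟨v, by rw [← hveq], hok, ?_⟩
    intro w hw
    obtain ⟨k', msbs', hk', hms', hg'⟩ := pvG_complete used wt mb w hwt hmb hw
    have hwmem : (w : Int) ∈ (pvPairs mb).filterMap (fun p => pvG used (pvBits wt) mb p.1 p.2) :=
      List.mem_filterMap.mpr ⟨(k', msbs'), (pvMem_pairs mb k' msbs').mpr ⟨hk', hms'⟩, hg'⟩
    rw [hvs] at hwmem
    have hle := pvFoldl_min_le tl hd (w : Int) hwmem
    rw [hveq] at hle
    exact_mod_cast hle

-- A's while loop returns the least element of pvP
lemma pvWhile_spec (used : PySem.Set Int) (wt mstar : Nat)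
    (hwt : 1 ≤ wt) (hcw : PySem.Set.contains used (wt : Int) = true)
    (hP : pvP used wt mstar) (hmin : ∀ j, pvP used wt j → mstar ≤ j) :
    ∀ (fuel mb0 : Nat),
      (∀ v, pvP used wt v → (pvBits wt).length + mb0 < (pvBits v).length) →
      (pvBits mstar).length ≤ (pvBits wt).length + mb0 + fuel →
      auptoWhile used (pvBits wt) fuel mb0 (wt : Int) = (mstar : Int) := by
  intro fuel
  induction fuel with
  | zero =>
    intro mb0 hyp hbd
    have := hyp mstar hP
    omega
  | succ fuel ih =>
    intro mb0 hyp hbd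
    rw [auptoWhile, if_pos hcw]
    rcases pvFor_spec used wt (mb0 + 1) (wt : Int) hwt (by omega) with ⟨heq, hnone⟩ | ⟨v, heq, hok, hleast⟩
    · rw [heq]
      show auptoWhile used (pvBits wt) fuel (mb0 + 1) (wt : Int) = (mstar : Int)
      apply ih
      · intro v hv
        have h1 := hyp v hv
        have h2 : (pvBits v).length ≠ (pvBits wt).length + (mb0 + 1) := by
          intro he
          exact hnone v ⟨hv.1, hv.2, he⟩
        omega
      · omega
    · rw [heq]
      show (v : Int) = (mstar : Int)
      have h1 : pvP used wt v := ⟨hok.1, hok.2.1⟩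
      have h2 : mstar ≤ v := hmin v h1
      have hlm : (pvBits wt).length + mb0 < (pvBits mstar).length := hyp mstar hP
      have hvm : (pvBits v).length = (pvBits wt).length + (mb0 + 1) := hok.2.2
      have hmono : (pvBits mstar).length ≤ (pvBits v).length := pvBits_length_mono h2
      have hexact : (pvBits mstar).length = (pvBits wt).length + (mb0 + 1) := by omega
      have h3 := hleast mstar ⟨hP.1, hP.2, hexact⟩
      have hvv : v = mstar := by omega
      rw [hvv]

-- one loop iteration: both step functions append the same next term
lemma pvStep_eq (alst : List Int) (used : PySem.Set Int)
    (hne : alst ≠ []) (hpos : ∀ x ∈ alst, 1 ≤ x) :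
    ∃ mstar : Nat, 1 ≤ mstar
      ∧ auptoStep alst used = (alst ++ [(mstar : Int)], PySem.Set.add used (mstar : Int))
      ∧ auptoStepAlt alst used = (alst ++ [(mstar : Int)], PySem.Set.add used (mstar : Int)) := by
  -- the last element and its popcount
  have hlast : (PySem.List.pyGet? alst (-1)).getD 0 = alst.getLast hne := by
    rw [PySem.List.pyGet?_neg_one, List.getLast?_eq_some_getLast hne]
    rfl
  have hlpos : 1 ≤ alst.getLast hne := hpos _ (List.getLast_mem hne)
  set pN : Nat := (alst.getLast hne).toNat with hpN
  have hcast : ((pN : Nat) : Int) = alst.getLast hne := Int.toNat_of_nonneg (by omega)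
  have hpN1 : 1 ≤ pN := by omega
  have hone : '1' ∈ pvBits pN := by
    cases hb : pvBits pN with
    | nil => exact absurd hb (pvBits_ne_nil pN)
    | cons c t =>
      have := pvBits_head pN hpN1
      rw [hb] at this
      injection this with h'
      rw [h']
      exact List.mem_cons_self
  set wtN : Nat := PySem.Chars.count (pvBits pN) ['1'] with hwtN
  have hwt : 1 ≤ wtN := pvCount_pos _ hone
  -- the least valid next term
  obtain ⟨v0, hPv0, hlen0, hle0⟩ := pvExists_target used wtN hwt
  obtain ⟨mstar, hPm, hminm⟩ := pvExists_least ⟨v0, hPv0⟩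
  have hmv0 : mstar ≤ v0 := hminm v0 hPv0
  have hwm : wtN ≤ mstar := pvP_ge hwt hPm
  have hm1 : 1 ≤ mstar := by omega
  refine ⟨mstar, hm1, ?_, ?_⟩
  · -- A's step
    unfold auptoStep
    simp only []
    rw [hlast, ← hcast, pvBin2 pN, ← hwtN, pvBin2 wtN]
    have hA : auptoWhile used (pvBits wtN) (used.length + 2) 0 ((wtN : Nat) : Int) = (mstar : Int) := by
      cases hcw : PySem.Set.contains used ((wtN : Nat) : Int) with
      | false =>
        rw [auptoWhile, if_neg (by rw [hcw]; simp)]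
        have : pvP used wtN wtN := ⟨hcw, List.infix_refl _⟩
        have h1 := hminm wtN this
        have : mstar = wtN := by omega
        rw [this]
      | true =>
        apply pvWhile_spec used wtN mstar hwt hcw hPm hminm (used.length + 2) 0
        · intro v hv
          have hlenle : (pvBits wtN).length ≤ (pvBits v).length := hv.2.length_le
          rcases eq_or_lt_of_le hlenle with he | hl
          · exfalso
            have hb : pvBits wtN = pvBits v := hv.2.eq_of_length he
            have hveq := congrArg pvVal hb
            rw [pvVal_pvBits, pvVal_pvBits] at hveq
            rw [← hveq] at hv
            rw [hv.1] at hcw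
            exact Bool.noConfusion hcw
          · omega
        · have := pvBits_length_mono hmv0
          omega
    rw [hA]
  · -- B's step
    unfold auptoStepAlt
    simp only []
    rw [hlast, ← hcast, pvBin2 pN, ← hwtN, pvBin2 wtN]
    have htN : ((wtN : Nat) : Int).toNat = wtN := rfl
    rw [htN]
    have hB : auptoScan used (pvBits wtN) ((wtN + 1) * 2 ^ (used.length + 1)) ((wtN : Nat) : Int) = (mstar : Int) := by
      apply pvScan_spec used wtN _ wtN mstar hwm
      · have h2 : wtN * 2 ^ (used.length + 1) < (wtN + 1) * 2 ^ (used.length + 1) := by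
          have : (0:Nat) < 2 ^ (used.length + 1) := by positivity
          nlinarith
        have h3 : wtN * 2 ^ (used.length + 1) ≥ v0 := by
          calc v0 ≤ wtN * 2 ^ (used.length + 1) := hle0
          _ = _ := rfl
        omega
      · intro j hj1 hj2 hPj
        have := hminm j hPj
        omega
      · exact hPm
    rw [hB]

-- the outer loops agree step by step
lemma pvLoop_eq (l : List Int) : ∀ (alst : List Int) (used : PySem.Set Int),
    alst ≠ [] → (∀ x ∈ alst, 1 ≤ x) →
    l.foldl (fun st _i => auptoStep st.1 st.2) (alst, used)
      = l.foldl (fun st _i => auptoStepAlt st.1 st.2) (alst, used) := by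
  induction l with
  | nil => intros; rfl
  | cons x t ih =>
    intro alst used h1 h2
    obtain ⟨mstar, hm1, hA, hB⟩ := pvStep_eq alst used h1 h2
    rw [List.foldl_cons, List.foldl_cons, hA, hB]
    apply ih
    · simp
    · intro y hy
      rcases List.mem_append.mp hy with hy | hy
      · exact h2 y hy
      · simp at hy
        rw [hy]
        exact_mod_cast hm1

-- ===== VERDICT (by name: the statement is the Claim_ definition above) =====
theorem aupto_spec : Claim_equal_aupto := by
  intro n _hdom
  unfold Spec_aupto aupto aupto_alt
  exact congrArg Prod.fst (pvLoop_eq (PySem.List.pyRange 2 (n + 1) 1) [1] (PySem.Set.ofList [1])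
    (by simp) (by intro x hx; simp at hx; omega))
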